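-- pv_equiv track=rewrite | github.com/vandosik/Algorithms | lab_5.py | find_new
-- ===== SOURCE A (Python) =====
-- v_num = 100  # vertices number
--
-- def find_new(components):
--     if len(components) == 0:
--         return 0
--     keys = components.keys()
--     for j in range(0, v_num):
--         flag = 1
--         for i in keys:
--             if j in components[i]:
--                 flag = 0
--         if flag == 1:
--             return j
--     return -1
-- ===== SOURCE B (Python) =====
-- v_num = 100  # vertices number
--
-- def find_new(components):
--     candidates = set(range(v_num))
--     for comp in components.values():
--         candidates -= set(comp)
--     return min(candidates) if candidates else -1
-- ===== Notes on version B (the rewrite author's own statement) =====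
-- stated objective: faster
-- what changed: B maintains the set of still-absent integers (set(range(100)) minus each component in one pass over the values) and returns its minimum, instead of A's scan of j=0..99 with a nested membership pass over every component list for each j.
import Mathlib
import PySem

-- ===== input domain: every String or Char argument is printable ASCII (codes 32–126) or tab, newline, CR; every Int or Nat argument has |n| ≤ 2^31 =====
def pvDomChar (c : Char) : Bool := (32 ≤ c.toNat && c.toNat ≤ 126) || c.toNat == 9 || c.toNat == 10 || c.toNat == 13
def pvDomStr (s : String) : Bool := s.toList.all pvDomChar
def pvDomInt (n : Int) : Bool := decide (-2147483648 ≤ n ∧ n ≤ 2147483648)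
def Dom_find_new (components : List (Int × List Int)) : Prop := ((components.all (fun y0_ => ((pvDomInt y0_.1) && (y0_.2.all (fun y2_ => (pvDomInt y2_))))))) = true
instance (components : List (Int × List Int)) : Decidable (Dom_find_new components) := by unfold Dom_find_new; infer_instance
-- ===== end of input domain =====

-- B maintains the set of still-absent integers and returns its minimum, instead of A's
-- j = 0..99 scan with a nested membership pass per j; same return value, B is simpler.


-- ===== PORT A =====
-- inner loop: flag = 1; for i in keys: if j in components[i]: flag = 0
-- (i ranges over the dict's own keys, so the KeyError case of components[i] is unreachable; getD [] is exact here)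
def findNewFlag (d : PySem.Dict Int (List Int)) (j : Int) (keys : List Int) : Int :=
  keys.foldl (fun flag i => if j ∈ d.getD i [] then 0 else flag) 1

-- outer loop: for j in range(0, v_num): …; if flag == 1: return j  — and return -1 after the loop
def findNewScan (d : PySem.Dict Int (List Int)) (keys : List Int) : List Int → Int
  | [] => -1
  | j :: js => if findNewFlag d j keys = 1 then j else findNewScan d keys js

def find_new (components : List (Int × List Int)) : Int :=
  if components.length = 0 then 0
  else
    let d : PySem.Dict Int (List Int) := PySem.Dict.mk components
    findNewScan d (PySem.Dict.keys d) (PySem.List.pyRange 0 100 1)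

-- ===== PORT B =====
def find_new_alt (components : List (Int × List Int)) : Int :=
  let candidates : PySem.Set Int :=
    components.foldl (fun c p => PySem.Set.diff c (PySem.Set.ofList p.2))
      (PySem.Set.ofList (PySem.List.pyRange 0 100 1))
  match PySem.List.min? candidates (fun y => y) with
  | some m => m
  | none => -1

-- ===== PRECONDITION & SPEC =====
-- The association list stands for a Python dict, whose keys are unique; lists with a
-- duplicated key do not represent any dict input of A, so Pre_ requires distinct keys.
def Pre_find_new (components : List (Int × List Int)) : Prop :=
  (components.map Prod.fst).Nodup
instance (components : List (Int × List Int)) : Decidable (Pre_find_new components) := by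
  unfold Pre_find_new; infer_instance
def pvWitness_find_new : (List (Int × List Int)) := [(1, [0, 2]), (2, [5])]

def Spec_find_new (components : List (Int × List Int)) (out : Int) : Prop := out = find_new_alt components
instance (components : List (Int × List Int)) (out : Int) : Decidable (Spec_find_new components out) := by unfold Spec_find_new; infer_instance

-- ===== CLAIM (what is proved, stated in full; the proofs are below) =====
def Claim_equal_find_new : Prop := ∀ (components : List (Int × List Int)), Dom_find_new components → Pre_find_new components → Spec_find_new components (find_new components)

-- ===== LEMMAS AND PROOFS =====

-- congruence for List.all under a pointwise equality on members
theorem list_all_congr {alpha : Type} (l : List alpha) (f g : alpha → Bool)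
    (h : ∀ x ∈ l, f x = g x) : l.all f = l.all g := by
  induction l with
  | nil => rfl
  | cons x xs ih =>
    simp only [List.all_cons, h x (by simp), ih (fun y hy => h y (by simp [hy]))]

-- A's inner flag loop computes "j absent from every components[i]" as 1/0
theorem findNewFlag_aux (d : PySem.Dict Int (List Int)) (j : Int) (keys : List Int) (a : Int) :
    keys.foldl (fun flag i => if j ∈ d.getD i [] then 0 else flag) a
      = if keys.all (fun i => !decide (j ∈ d.getD i [])) then a else 0 := by
  induction keys generalizing a with
  | nil => simp
  | cons k ks ih =>
    simp only [List.foldl_cons, List.all_cons, ih]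
    by_cases h : j ∈ d.getD k [] <;> simp [h]

theorem findNewFlag_eq (d : PySem.Dict Int (List Int)) (j : Int) (keys : List Int) :
    findNewFlag d j keys = if keys.all (fun i => !decide (j ∈ d.getD i [])) then 1 else 0 :=
  findNewFlag_aux d j keys 1

-- A's outer loop returns the first element of the scanned list passing the flag test, else -1
theorem findNewScan_eq (d : PySem.Dict Int (List Int)) (keys : List Int) (L : List Int) :
    findNewScan d keys L
      = ((L.filter (fun j => keys.all (fun i => !decide (j ∈ d.getD i [])))).head?).getD (-1) := by
  induction L with
  | nil => rfl
  | cons j js ih =>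
    rw [findNewScan, findNewFlag_eq]
    by_cases hq : keys.all (fun i => !decide (j ∈ d.getD i [])) = true <;>
      simp [hq, ih]

-- with distinct keys, the keys-indexed test equals the per-pair test
theorem keys_test_eq (components : List (Int × List Int))
    (hnd : (components.map Prod.fst).Nodup) (j : Int) :
    (components.map Prod.fst).all
        (fun i => !decide (j ∈ (PySem.Dict.mk components).getD i []))
      = components.all (fun p => !decide (j ∈ p.2)) := by
  rw [List.all_map]
  apply list_all_congr
  intro p hp
  have : (PySem.Dict.mk components).getD p.1 [] = p.2 :=
    PySem.Dict.getD_of_mem_items (d := PySem.Dict.mk components) (k := p.1) (v := p.2)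
      (by simpa using hp) (by simpa [PySem.Dict.keys] using hnd) []
  simp [Function.comp, this]

-- B's fold of set differences is the filter of the start set by "absent from every component"
theorem candidates_eq (components : List (Int × List Int)) (s : PySem.Set Int) :
    components.foldl (fun c p => PySem.Set.diff c (PySem.Set.ofList p.2)) s
      = s.filter (fun j => components.all (fun p => !decide (j ∈ p.2))) := by
  induction components generalizing s with
  | nil => simp
  | cons p rest ih =>
    rw [List.foldl_cons, ih]
    have hdiff : PySem.Set.diff s (PySem.Set.ofList p.2)
        = s.filter (fun x => !PySem.Set.contains (PySem.Set.ofList p.2) x) := rfl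
    rw [hdiff, List.filter_filter]
    apply List.filter_congr
    intro x _
    simp [PySem.Set.mem_ofList, Bool.and_comm]

-- generic: find-first equals head of filter;  min of a <-sorted list is its head
theorem foldl_min_of_le (t : List Int) : ∀ x : Int, (∀ y ∈ t, x ≤ y) → t.foldl min x = x := by
  induction t with
  | nil => intro x _; rfl
  | cons y ys ih =>
    intro x h
    have hxy : min x y = x := min_eq_left (h y (by simp))
    simp only [List.foldl_cons, hxy]
    exact ih x (fun z hz => h z (by simp [hz]))

theorem min?_of_sorted (l : List Int) (hl : l.Pairwise (· < ·)) :
    (match PySem.List.min? l (fun y => y) with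
      | some m => m
      | none => -1) = (l.head?).getD (-1) := by
  cases l with
  | nil => rfl
  | cons x t =>
    rw [PySem.List.min?_id_cons]
    have : t.foldl min x = x := by
      apply foldl_min_of_le
      intro y hy
      exact le_of_lt ((List.pairwise_cons.mp hl).1 y hy)
    simp [this]

-- ===== VERDICT (by name: the statement is the Claim_ definition above) =====
set_option maxRecDepth 8192 in
theorem find_new_spec : Claim_equal_find_new := by
  intro components _ hpre
  unfold Spec_find_new find_new find_new_alt
  rw [candidates_eq]
  have hR : PySem.Set.ofList (PySem.List.pyRange 0 100 1) = PySem.List.pyRange 0 100 1 :=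
    PySem.Set.ofList_eq_self_of_nodup _ (PySem.List.nodup_pyRange_one 0 100)
  rw [hR]
  have hpair : (PySem.List.pyRange 0 100 1).Pairwise (· < ·) :=
    PySem.List.pairwise_lt_pyRange_one 0 100
  rw [min?_of_sorted _ (hpair.filter _)]
  by_cases hlen : components.length = 0
  · have : components = [] := List.length_eq_zero_iff.mp hlen
    subst this
    rw [PySem.List.pyRange_one_cons (by norm_num)]
    simp
  · rw [if_neg hlen]
    rw [findNewScan_eq]
    congr 1
    apply congrArg
    apply List.filter_congr
    intro j _
    have hkeys : PySem.Dict.keys (PySem.Dict.mk components) = components.map Prod.fst := by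
      simp [PySem.Dict.keys]
    rw [hkeys, keys_test_eq components hpre j]
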